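-- pv_equiv track=rewrite | github.com/daniel-reich/ubiquitous-fiesta | tjMNAEgkNvM5eyEqJ_10.py | unique_abbrev
-- ===== SOURCE A (Python) =====
-- def unique_abbrev(abbs, words):
--   true_Count = 0
--   for abbrev in abbs:
--     for word in words:
--       if word.startswith(abbrev):
--         true_Count += 1
--   if true_Count > 3:
--     return False
--   else:
--     return True
-- ===== SOURCE B (Python) =====
-- def unique_abbrev(abbs, words):
--     counts = {}
--     for w in words:
--         for i in range(len(w) + 1):
--             p = w[:i]
--             counts[p] = counts.get(p, 0) + 1
--     total = 0
--     for a in abbs: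
--         total += counts.get(a, 0)
--     return total <= 3
-- ===== Notes on version B (the rewrite author's own statement) =====
-- stated objective: faster
-- what changed: Instead of scanning all words for every abbreviation, B builds a hash map from every prefix of every word to the number of words having that prefix, then answers each abbreviation by a single dictionary lookup.
import Mathlib
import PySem

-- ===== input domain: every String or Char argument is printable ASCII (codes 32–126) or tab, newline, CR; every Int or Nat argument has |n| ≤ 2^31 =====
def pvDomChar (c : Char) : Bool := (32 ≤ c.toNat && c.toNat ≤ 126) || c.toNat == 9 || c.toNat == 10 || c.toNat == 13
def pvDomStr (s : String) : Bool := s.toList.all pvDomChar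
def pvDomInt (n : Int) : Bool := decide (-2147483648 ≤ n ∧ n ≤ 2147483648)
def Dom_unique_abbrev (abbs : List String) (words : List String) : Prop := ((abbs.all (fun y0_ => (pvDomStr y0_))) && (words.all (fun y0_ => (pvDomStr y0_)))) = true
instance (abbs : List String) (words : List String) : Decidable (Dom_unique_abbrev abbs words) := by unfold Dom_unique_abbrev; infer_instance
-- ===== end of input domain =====

-- B replaces A's nested scan (every abbreviation against every word) by a prefix-count
-- dictionary built once from the words, answering each abbreviation with one lookup.

-- ===== PORT A =====
def unique_abbrev (abbs : List String) (words : List String) : Bool :=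
  let true_Count : Int :=
    abbs.foldl (fun acc ab =>
      words.foldl (fun acc2 word =>
        if PySem.Str.startswith word ab then acc2 + 1 else acc2) acc) 0
  if true_Count > 3 then false else true

-- ===== PORT B =====
def prefCounts (words : List String) : PySem.Dict String Int :=
  words.foldl (fun counts w =>
    (PySem.List.pyRange 0 (PySem.Str.len w + 1) 1).foldl
      (fun counts i =>
        let p := PySem.Str.slice w none (some i)
        counts.insert p (counts.getD p 0 + 1)) counts)
    PySem.Dict.empty

def unique_abbrev_alt (abbs : List String) (words : List String) : Bool :=
  let counts := prefCounts words
  let total : Int := abbs.foldl (fun t a => t + counts.getD a 0) 0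
  decide (total ≤ 3)

-- ===== PRECONDITION & SPEC =====
def Spec_unique_abbrev (abbs : List String) (words : List String) (out : Bool) : Prop := out = unique_abbrev_alt abbs words
instance (abbs : List String) (words : List String) (out : Bool) : Decidable (Spec_unique_abbrev abbs words out) := by unfold Spec_unique_abbrev; infer_instance

-- ===== CLAIM (what is proved, stated in full; the proofs are below) =====
def Claim_equal_unique_abbrev : Prop := ∀ (abbs : List String) (words : List String), Dom_unique_abbrev abbs words → Spec_unique_abbrev abbs words (unique_abbrev abbs words)

-- ===== LEMMAS AND PROOFS =====

theorem str_slice_take (w : String) (k : Nat) :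
    PySem.Str.slice w none (some (k : Int)) = String.ofList (w.toList.take k) := by
  have h : (PySem.Str.slice w none (some (k : Int))).toList = w.toList.take k := by
    rw [PySem.Str.toList_slice, PySem.Chars.slice_eq_listSlice, PySem.List.slice_to_natCast]
  calc PySem.Str.slice w none (some (k : Int))
      = String.ofList (PySem.Str.slice w none (some (k : Int))).toList := by rw [String.ofList_toList]
    _ = String.ofList (w.toList.take k) := by rw [h]

-- The list of string-slices B builds for one word is exactly the list of its prefixes.
theorem prefList_eq (w : String) :
    (PySem.List.pyRange 0 (PySem.Str.len w + 1) 1).map (fun i => PySem.Str.slice w none (some i))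
      = (List.range (w.toList.length + 1)).map (fun k => String.ofList (w.toList.take k)) := by
  rw [PySem.List.pyRange_one, List.map_map]
  have hn : ((PySem.Str.len w + 1 : Int) - 0).toNat = w.toList.length + 1 := by
    simp [PySem.Str.len_eq]
  rw [hn]
  apply List.map_congr_left
  intro k _
  show PySem.Str.slice w none (some ((0 : Int) + (k : Int))) = String.ofList (w.toList.take k)
  rw [zero_add, str_slice_take]

-- A string occurs exactly once among the prefixes of w iff it is a prefix of w, else zero times.
theorem count_prefixes (cs : List Char) (a : String) :
    List.count a ((List.range (cs.length + 1)).map (fun k => String.ofList (cs.take k)))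
      = if a.toList <+: cs then 1 else 0 := by
  rw [List.count, List.countP_map]
  by_cases h : a.toList <+: cs
  · have hlen : a.toList.length ≤ cs.length := h.length_le
    have hcong : List.countP ((fun x => x == a) ∘ fun k => String.ofList (cs.take k)) (List.range (cs.length + 1))
        = List.countP (fun k => k == a.toList.length) (List.range (cs.length + 1)) := by
      apply List.countP_congr
      intro k hk
      have hk' : k ≤ cs.length := by
        have := List.mem_range.mp hk; omega
      simp only [Function.comp, beq_iff_eq]
      constructor
      · intro he
        have htl : cs.take k = a.toList := by
          have := congrArg String.toList he; simpa using this
        have hlen2 : (cs.take k).length = a.toList.length := by rw [htl]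
        rw [List.length_take] at hlen2
        omega
      · intro he
        subst he
        rw [← List.prefix_iff_eq_take.mp h]
        simp
    rw [hcong]
    have hc : List.countP (fun k => k == a.toList.length) (List.range (cs.length + 1))
        = List.count a.toList.length (List.range (cs.length + 1)) := rfl
    rw [hc, List.count_range, if_pos (by omega : a.toList.length < cs.length + 1), if_pos h]
  · rw [if_neg h]
    apply List.countP_eq_zero.mpr
    intro k hk
    simp only [Function.comp, beq_iff_eq]
    intro he
    apply h
    have : (String.ofList (cs.take k)).toList <+: cs := by simpa using List.take_prefix k cs
    exact he ▸ this

-- getD on the built dictionary counts the words having the key as a prefix.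
theorem getD_prefCounts_aux (ws : List String) (a : String) (d : PySem.Dict String Int) :
    (ws.foldl (fun counts w =>
      (PySem.List.pyRange 0 (PySem.Str.len w + 1) 1).foldl
        (fun counts i =>
          let p := PySem.Str.slice w none (some i)
          counts.insert p (counts.getD p 0 + 1)) counts) d).getD a 0
      = d.getD a 0 + (ws.countP (fun w => PySem.Str.startswith w a) : Int) := by
  induction ws generalizing d with
  | nil => simp
  | cons w ws ih =>
    rw [List.foldl_cons, ih]
    have hsw : PySem.Str.startswith w a = true ↔ a.toList <+: w.toList := by
      rw [PySem.Str.startswith_eq]; exact PySem.Chars.startswith_iff _ _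
    have hinner :
        ((PySem.List.pyRange 0 (PySem.Str.len w + 1) 1).foldl
          (fun counts i =>
            let p := PySem.Str.slice w none (some i)
            counts.insert p (counts.getD p 0 + 1)) d).getD a 0
        = d.getD a 0 + (if PySem.Str.startswith w a then (1 : Int) else 0) := by
      have hmap :
          ((PySem.List.pyRange 0 (PySem.Str.len w + 1) 1).map (fun i => PySem.Str.slice w none (some i))).foldl
            (fun counts p => counts.insert p (counts.getD p 0 + 1)) d
          = (PySem.List.pyRange 0 (PySem.Str.len w + 1) 1).foldl
            (fun counts i =>
              let p := PySem.Str.slice w none (some i)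
              counts.insert p (counts.getD p 0 + 1)) d := List.foldl_map
      rw [← hmap, prefList_eq, PySem.Dict.getD_foldl_insert_add_one, count_prefixes]
      by_cases h : a.toList <+: w.toList
      · simp only [hsw]
        simp [h]
      · simp only [hsw]
        simp [h]
    rw [hinner, List.countP_cons]
    push_cast
    by_cases h : PySem.Str.startswith w a = true
    · rw [if_pos h]; ring
    · rw [if_neg h]; ring

theorem getD_prefCounts (ws : List String) (a : String) :
    (prefCounts ws).getD a 0 = (ws.countP (fun w => PySem.Str.startswith w a) : Int) := by
  unfold prefCounts
  rw [getD_prefCounts_aux]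
  simp

theorem foldl_ext_mem {α β : Type} (f g : β → α → β) (l : List α) (init : β)
    (h : ∀ b a, a ∈ l → f b a = g b a) : l.foldl f init = l.foldl g init := by
  induction l generalizing init with
  | nil => rfl
  | cons x xs ih =>
    rw [List.foldl_cons, List.foldl_cons, h init x (by simp)]
    exact ih _ (fun b a ha => h b a (by simp [ha]))

-- ===== VERDICT (by name: the statement is the Claim_ definition above) =====
theorem unique_abbrev_spec : Claim_equal_unique_abbrev := by
  intro abbs words _
  unfold Spec_unique_abbrev unique_abbrev unique_abbrev_alt
  have hA : abbs.foldl (fun acc ab =>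
      words.foldl (fun acc2 word =>
        if PySem.Str.startswith word ab then acc2 + 1 else acc2) acc) (0 : Int)
      = abbs.foldl (fun t a => t + (prefCounts words).getD a 0) (0 : Int) := by
    apply foldl_ext_mem
    intro acc a _
    rw [PySem.List.foldl_count_if, getD_prefCounts]
  simp only []
  rw [hA]
  by_cases h : abbs.foldl (fun t a => t + (prefCounts words).getD a 0) (0 : Int) > 3
  · simp [h]
  · simp [h]
    omega
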